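-- pv_equiv track=rewrite | github.com/enbanbunbun123/atcoder_python | 20240522_practice/ABC049C-daydream.py | canconstruct_from_suffixes
-- ===== SOURCE A (Python) =====
-- def canconstruct_from_suffixes(S):
--     suffixes = ['dream', 'dreamer', 'erase', 'eraser']
--
--     #Sを後ろから見ているgreedyアルゴリズム
--     S = S[::-1]
--     suffixes = [suffix[::-1] for suffix in suffixes]
--
--     i = 0
--     while i < len(S):
--         matched = False
--         for suffix in suffixes:
--             if S[i:i+len(suffix)] == suffix:
--                 matched = True
--                 i += len(suffix)
--                 break
--
--         if not matched:
--             return "NO"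
--     return "YES"
-- ===== SOURCE B (Python) =====
-- def canconstruct_from_suffixes(S):
--     # Forward DP over prefixes: dp[i] == True iff S[:i] is a concatenation of the words.
--     words = ('dream', 'dreamer', 'erase', 'eraser')
--     n = len(S)
--     dp = [False] * (n + 1)
--     dp[0] = True
--     for i in range(1, n + 1):
--         dp[i] = any(len(w) <= i and dp[i - len(w)] and S[i - len(w):i] == w
--                     for w in words)
--     return "YES" if dp[n] else "NO"
-- ===== Notes on version B (the rewrite author's own statement) =====
-- stated objective: alternative
-- what changed: Replaces A's backward greedy scan (reverse the string and repeatedly commit to the first matching reversed word) with a forward dynamic program over prefixes (dp[i] = prefix of length i is a concatenation of the four words), which explores all decompositions instead of committing greedily.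
import Mathlib
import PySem

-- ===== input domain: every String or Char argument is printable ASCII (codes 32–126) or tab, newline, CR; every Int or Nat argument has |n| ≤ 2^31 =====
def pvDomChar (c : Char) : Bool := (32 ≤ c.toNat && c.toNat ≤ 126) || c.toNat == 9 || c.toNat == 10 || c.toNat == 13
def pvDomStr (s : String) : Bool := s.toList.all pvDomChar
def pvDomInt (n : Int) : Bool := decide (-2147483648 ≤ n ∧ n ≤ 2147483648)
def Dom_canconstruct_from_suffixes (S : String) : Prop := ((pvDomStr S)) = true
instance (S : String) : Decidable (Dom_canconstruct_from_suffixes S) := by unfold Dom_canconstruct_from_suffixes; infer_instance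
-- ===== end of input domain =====

-- B replaces A's backward greedy scan (reverse the string, commit to the first matching reversed word)
-- by a forward dynamic program over prefixes — a different algorithm of the same cost (objective: alternative).

-- ===== PORT A =====
-- A's word list, reversed exactly as the Python does (suffix[::-1] for each literal word).
def pvSuffixesRev : List (List Char) :=
  [['d','r','e','a','m'], ['d','r','e','a','m','e','r'],
   ['e','r','a','s','e'], ['e','r','a','s','e','r']].map
    (fun suffix => (PySem.List.slice? suffix none none (-1)).getD [])

-- needed by pvGreedyA's decreasing_by
theorem pvSuffixesRev_pos : ∀ w ∈ pvSuffixesRev, 0 < w.length := by decide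

-- A's while-loop: index i over the reversed string T; the for/break over the words is find? (first match).
def pvGreedyA (T : List Char) (i : Nat) : String :=
  if h : i < T.length then
    match hf : pvSuffixesRev.find?
        (fun w => PySem.List.slice T (some (i : Int)) (some ((i : Int) + (w.length : Int))) == w) with
    | some w => pvGreedyA T (i + w.length)
    | none => "NO"
  else "YES"
termination_by T.length - i
decreasing_by
  have := pvSuffixesRev_pos w (List.mem_of_find?_eq_some hf)
  omega

def canconstruct_from_suffixes (S : String) : String :=
  let T := (PySem.List.slice? S.toList none none (-1)).getD []   -- S[::-1]
  pvGreedyA T 0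

-- ===== PORT B =====
def pvWordsB : List (List Char) :=
  [['d','r','e','a','m'], ['d','r','e','a','m','e','r'],
   ['e','r','a','s','e'], ['e','r','a','s','e','r']]

def canconstruct_from_suffixes_alt (S : String) : String :=
  let s := S.toList
  let n := s.length
  let dp0 := (List.replicate (n+1) false).set 0 true
  let dp := (PySem.List.pyRange 1 ((n : Int) + 1)).foldl
    (fun dp i => dp.set i.toNat (pvWordsB.any (fun w =>
        decide ((w.length : Int) ≤ i) && dp.getD (i.toNat - w.length) false &&
        (PySem.List.slice s (some (i - (w.length : Int))) (some i) == w)))) dp0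
  if dp.getD n false then "YES" else "NO"

-- ===== PRECONDITION & SPEC =====
def Spec_canconstruct_from_suffixes (S : String) (out : String) : Prop := out = canconstruct_from_suffixes_alt S
instance (S : String) (out : String) : Decidable (Spec_canconstruct_from_suffixes S out) := by unfold Spec_canconstruct_from_suffixes; infer_instance

-- ===== CLAIM (what is proved, stated in full; the proofs are below) =====
def Claim_equal_canconstruct_from_suffixes : Prop := ∀ (S : String), Dom_canconstruct_from_suffixes S → Spec_canconstruct_from_suffixes S (canconstruct_from_suffixes S)

-- ===== LEMMAS AND PROOFS =====

-- t is a concatenation of reversed words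
inductive pvDecomp : List Char → Prop
  | nil : pvDecomp []
  | cons (w t : List Char) : w ∈ pvSuffixesRev → pvDecomp t → pvDecomp (w ++ t)

theorem pvDecomp_inv {u : List Char} (h : pvDecomp u) (hne : u ≠ []) :
    ∃ w t, w ∈ pvSuffixesRev ∧ pvDecomp t ∧ u = w ++ t := by
  cases h with
  | nil => exact absurd rfl hne
  | cons w t hw hd => exact ⟨w, t, hw, hd, rfl⟩

-- no two distinct reversed words are comparable by prefix: the greedy match is unique
theorem pvUniq : ∀ w1 ∈ pvSuffixesRev, ∀ w2 ∈ pvSuffixesRev, (w1 <+: w2 ∨ w2 <+: w1) → w1 = w2 := by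
  decide

theorem pvRev_eq : pvSuffixesRev = pvWordsB.map List.reverse := by decide

theorem pvWordsB_pos : ∀ w ∈ pvWordsB, 0 < w.length := by decide

theorem pvSliceWin (T : List Char) (i L : Nat) :
    PySem.List.slice T (some (i : Int)) (some ((i : Int) + (L : Int))) = (T.drop i).take L := by
  simp [pysem]

theorem pvGreedy_iff (T : List Char) :
    ∀ k i, T.length - i ≤ k → (pvGreedyA T i = "YES" ↔ pvDecomp (T.drop i)) := by
  intro k
  induction k with
  | zero =>
    intro i hi
    rw [pvGreedyA, dif_neg (by omega)]
    rw [List.drop_eq_nil_of_le (by omega)]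
    simp [pvDecomp.nil]
  | succ k ih =>
    intro i hi
    by_cases h : i < T.length
    · rw [pvGreedyA, dif_pos h]
      split
      next w hf =>
        have hmem : w ∈ pvSuffixesRev := List.mem_of_find?_eq_some hf
        have hpos : 0 < w.length := pvSuffixesRev_pos w hmem
        have hp : (T.drop i).take w.length = w := by
          have := List.find?_some hf
          simpa [pvSliceWin] using this
        have hpref : w <+: T.drop i := hp ▸ List.take_prefix _ _
        obtain ⟨r, hr⟩ := hpref
        have hdropsplit : T.drop (i + w.length) = r := by
          have h2 : (T.drop i).drop w.length = r := by rw [← hr, List.drop_left]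
          rwa [List.drop_drop] at h2
        have hsplit : T.drop i = w ++ T.drop (i + w.length) := by rw [hdropsplit, hr]
        have ihw := ih (i + w.length) (by omega)
        constructor
        · intro hy
          rw [hsplit]
          exact pvDecomp.cons _ _ hmem (ihw.mp hy)
        · intro hd
          apply ihw.mpr
          rw [hsplit] at hd
          obtain ⟨w', t', hw', hd', he⟩ := pvDecomp_inv hd (by
            intro hc
            exact absurd (List.append_eq_nil_iff.mp hc).1 (by
              intro h0; rw [h0] at hpos; simp at hpos))
          have hw'pref : w' <+: w ++ T.drop (i + w.length) := ⟨t', he.symm⟩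
          have hwpref : w <+: w ++ T.drop (i + w.length) := ⟨_, rfl⟩
          have hww : w' = w := pvUniq w' hw' w hmem (List.prefix_or_prefix_of_prefix hw'pref hwpref)
          rw [hww] at he
          have ht : t' = T.drop (i + w.length) := (List.append_cancel_left he).symm
          rwa [ht] at hd'
      next hf =>
        have hnone := List.find?_eq_none.mp hf
        constructor
        · intro hy; exact absurd hy (by decide)
        · intro hd
          obtain ⟨w, t, hw, hd', he⟩ := pvDecomp_inv hd (by
            intro hc
            have : T.length ≤ i := List.drop_eq_nil_iff.mp hc
            omega)
          have hpw : (PySem.List.slice T (some (i : Int)) (some ((i : Int) + (w.length : Int))) == w) = true := by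
            rw [pvSliceWin, he, List.take_left]; exact beq_self_eq_true w
          have := hnone w hw
          simp [hpw] at this
    · rw [pvGreedyA, dif_neg h]
      rw [List.drop_eq_nil_of_le (by omega)]
      simp [pvDecomp.nil]

theorem pvGreedy_cases (T : List Char) :
    ∀ k i, T.length - i ≤ k → (pvGreedyA T i = "YES" ∨ pvGreedyA T i = "NO") := by
  intro k
  induction k with
  | zero => intro i hi; rw [pvGreedyA, dif_neg (by omega)]; left; rfl
  | succ k ih =>
    intro i hi
    by_cases h : i < T.length
    · rw [pvGreedyA, dif_pos h]
      split
      next w hf =>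
        have hpos := pvSuffixesRev_pos w (List.mem_of_find?_eq_some hf)
        exact ih (i + w.length) (by omega)
      next hf => right; rfl
    · rw [pvGreedyA, dif_neg h]; left; rfl

theorem pvA_iff (S : String) :
    canconstruct_from_suffixes S = "YES" ↔ pvDecomp S.toList.reverse := by
  unfold canconstruct_from_suffixes
  simp only [PySem.List.slice?_none_none_neg_one, Option.getD_some]
  simpa using pvGreedy_iff S.toList.reverse S.toList.reverse.length 0 (by omega)

theorem pvA_cases (S : String) :
    canconstruct_from_suffixes S = "YES" ∨ canconstruct_from_suffixes S = "NO" := by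
  unfold canconstruct_from_suffixes
  simp only [PySem.List.slice?_none_none_neg_one, Option.getD_some]
  exact pvGreedy_cases S.toList.reverse S.toList.reverse.length 0 (by omega)

-- the DP recurrence: the reversed prefix of length i decomposes iff some word ends at i over a decomposable shorter prefix
theorem pvStep (s : List Char) (i : Nat) (h1 : 1 ≤ i) (hn : i ≤ s.length) :
    pvDecomp ((s.take i).reverse) ↔
      ∃ w, w ∈ pvWordsB ∧ w.length ≤ i ∧ pvDecomp ((s.take (i - w.length)).reverse) ∧
        (s.drop (i - w.length)).take w.length = w := by
  constructor
  · intro hd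
    have hlen : (s.take i).length = i := by rw [List.length_take]; omega
    obtain ⟨rw', t, hrw, hdt, hu⟩ := pvDecomp_inv hd (by
      intro hc
      have := congrArg List.length hc
      simp [hlen] at this
      omega)
    rw [pvRev_eq] at hrw
    obtain ⟨w, hw, hwr⟩ := List.mem_map.mp hrw
    subst hwr
    have hts : s.take i = t.reverse ++ w := by
      have := congrArg List.reverse hu
      simpa [List.reverse_append] using this
    have hlens : t.reverse.length + w.length = i := by
      have h3 := congrArg List.length hts
      rw [hlen, List.length_append] at h3
      omega
    have hwl : w.length ≤ i := by omega
    have htr : t.reverse = s.take (i - w.length) := by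
      have h1' : (s.take i).take (i - w.length) = s.take (i - w.length) := by
        rw [List.take_take]; congr 1; omega
      rw [← h1', hts, show i - w.length = t.reverse.length by omega, List.take_left]
    have hwdrop : (s.drop (i - w.length)).take w.length = w := by
      have h2' : (s.take i).drop (i - w.length) = (s.drop (i - w.length)).take w.length := by
        rw [List.drop_take]; congr 1; omega
      rw [← h2', hts, show i - w.length = t.reverse.length by omega, List.drop_left]
    refine ⟨w, hw, hwl, ?_, hwdrop⟩
    rw [← htr, List.reverse_reverse]
    exact hdt
  · rintro ⟨w, hw, hwl, hdp, hsl⟩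
    have key : s.take i = s.take (i - w.length) ++ w := by
      have h1' : (s.take i).take (i - w.length) = s.take (i - w.length) := by
        rw [List.take_take]; congr 1; omega
      have h2' : (s.take i).drop (i - w.length) = w := by
        rw [List.drop_take, show i - (i - w.length) = w.length by omega, hsl]
      calc s.take i = (s.take i).take (i - w.length) ++ (s.take i).drop (i - w.length) :=
            (List.take_append_drop _ _).symm
        _ = s.take (i - w.length) ++ w := by rw [h1', h2']
    rw [key, List.reverse_append]
    exact pvDecomp.cons _ _ (by rw [pvRev_eq]; exact List.mem_map.2 ⟨w, hw, rfl⟩) hdp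

-- B's dp, abstracted for the proofs: step function and the table after processing i = 1..m
def pvDpStep (s : List Char) : List Bool → Int → List Bool :=
  fun dp i => dp.set i.toNat (pvWordsB.any (fun w =>
      decide ((w.length : Int) ≤ i) && dp.getD (i.toNat - w.length) false &&
      (PySem.List.slice s (some (i - (w.length : Int))) (some i) == w)))

def pvDpUpTo (s : List Char) (m : Nat) : List Bool :=
  (PySem.List.pyRange 1 ((m : Int) + 1)).foldl (pvDpStep s) ((List.replicate (s.length + 1) false).set 0 true)

theorem pvB_eq (S : String) :
    canconstruct_from_suffixes_alt S =
      if (pvDpUpTo S.toList S.toList.length).getD S.toList.length false then "YES" else "NO" := rfl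

theorem pvDP_inv (s : List Char) : ∀ m : Nat, m ≤ s.length →
    (pvDpUpTo s m).length = s.length + 1 ∧
    ∀ j : Nat, ((pvDpUpTo s m).getD j false = true ↔ (j ≤ m ∧ pvDecomp ((s.take j).reverse))) := by
  intro m
  induction m with
  | zero =>
    intro _
    have h0 : pvDpUpTo s 0 = (List.replicate (s.length + 1) false).set 0 true := by
      rw [pvDpUpTo, show ((0 : Nat) : Int) + 1 = 1 by norm_num,
        show PySem.List.pyRange 1 1 = [] from by decide]
      rfl
    rw [h0]
    refine ⟨by simp, ?_⟩
    intro j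
    rcases Nat.eq_zero_or_pos j with hj | hj
    · subst hj
      rw [List.getD_eq_getElem?_getD, List.getElem?_set_self (by simp)]
      simpa using pvDecomp.nil
    · rw [List.getD_eq_getElem?_getD, List.getElem?_set_ne (by omega)]
      have hrep : ((List.replicate (s.length + 1) false)[j]?).getD false = false := by
        rcases Nat.lt_or_ge j (s.length + 1) with h | h
        · simp [h]
        · simp [List.getElem?_eq_none (by simp; omega : List.length (List.replicate (s.length + 1) false) ≤ j)]
      rw [hrep]
      constructor
      · intro h; exact absurd h (by decide)
      · rintro ⟨h1, _⟩; omega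
  | succ m ih =>
    intro hm1
    obtain ⟨ihl, ihg⟩ := ih (by omega)
    have hstep : pvDpUpTo s (m + 1) = pvDpStep s (pvDpUpTo s m) ((m : Int) + 1) := by
      rw [pvDpUpTo, pvDpUpTo,
        show ((m + 1 : Nat) : Int) + 1 = ((m : Int) + 1) + 1 by push_cast; ring,
        PySem.List.pyRange_one_succ_right (by omega), List.foldl_append]
      rfl
    have hiN : ((m : Int) + 1).toNat = m + 1 := by omega
    refine ⟨by rw [hstep, pvDpStep]; simpa using ihl, ?_⟩
    intro j
    rw [hstep, pvDpStep]
    simp only [hiN]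
    by_cases hj : j = m + 1
    · subst hj
      rw [List.getD_eq_getElem?_getD, List.getElem?_set_self (by rw [ihl]; omega)]
      simp only [Option.getD_some]
      have hrhs : (m + 1 ≤ m + 1 ∧ pvDecomp ((s.take (m + 1)).reverse)) ↔
          pvDecomp ((s.take (m + 1)).reverse) := by
        constructor
        · exact fun h => h.2
        · exact fun h => ⟨le_rfl, h⟩
      rw [hrhs, pvStep s (m + 1) (by omega) hm1, List.any_eq_true]
      constructor
      · rintro ⟨w, hw, hf⟩
        simp only [Bool.and_eq_true, decide_eq_true_eq, beq_iff_eq] at hf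
        obtain ⟨⟨h1, h2⟩, h3⟩ := hf
        have hwl : w.length ≤ m + 1 := by exact_mod_cast h1
        have hcast : (m : Int) + 1 - (w.length : Int) = ((m + 1 - w.length : Nat) : Int) := by
          omega
        have hcast2 : ((m : Int) + 1) = ((m + 1 - w.length : Nat) : Int) + (w.length : Int) := by
          omega
        rw [hcast, hcast2, pvSliceWin] at h3
        exact ⟨w, hw, hwl, (ihg (m + 1 - w.length)).mp h2 |>.2, h3⟩
      · rintro ⟨w, hw, hwl, hdp, hsl⟩
        have hpos := pvWordsB_pos w hw
        refine ⟨w, hw, ?_⟩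
        simp only [Bool.and_eq_true, decide_eq_true_eq, beq_iff_eq]
        refine ⟨⟨by exact_mod_cast hwl, (ihg (m + 1 - w.length)).mpr ⟨by omega, hdp⟩⟩, ?_⟩
        have hcast : (m : Int) + 1 - (w.length : Int) = ((m + 1 - w.length : Nat) : Int) := by
          omega
        have hcast2 : ((m : Int) + 1) = ((m + 1 - w.length : Nat) : Int) + (w.length : Int) := by
          omega
        rw [hcast, hcast2, pvSliceWin]
        exact hsl
    · rw [List.getD_eq_getElem?_getD, List.getElem?_set_ne (by omega), ← List.getD_eq_getElem?_getD,
        ihg j]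
      constructor
      · rintro ⟨h1, h2⟩; exact ⟨by omega, h2⟩
      · rintro ⟨h1, h2⟩; exact ⟨by omega, h2⟩

theorem pvB_iff (S : String) :
    canconstruct_from_suffixes_alt S = "YES" ↔ pvDecomp S.toList.reverse := by
  rw [pvB_eq]
  have h := (pvDP_inv S.toList S.toList.length le_rfl).2 S.toList.length
  rw [List.take_length] at h
  split
  · next hc =>
    constructor
    · intro _; exact (h.mp hc).2
    · intro _; rfl
  · next hc =>
    constructor
    · intro hy; exact absurd hy (by decide)
    · intro hdec; exact absurd (h.mpr ⟨le_rfl, hdec⟩) hc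

-- ===== VERDICT (by name: the statement is the Claim_ definition above) =====
theorem canconstruct_from_suffixes_spec : Claim_equal_canconstruct_from_suffixes := by
  intro S _
  unfold Spec_canconstruct_from_suffixes
  by_cases hd : pvDecomp S.toList.reverse
  · rw [(pvA_iff S).mpr hd, (pvB_iff S).mpr hd]
  · have hA : canconstruct_from_suffixes S = "NO" := by
      rcases pvA_cases S with h | h
      · exact absurd ((pvA_iff S).mp h) hd
      · exact h
    have hB : canconstruct_from_suffixes_alt S = "NO" := by
      have hcase : canconstruct_from_suffixes_alt S = "YES" ∨
          canconstruct_from_suffixes_alt S = "NO" := by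
        rw [pvB_eq]; split
        · exact Or.inl rfl
        · exact Or.inr rfl
      rcases hcase with h | h
      · exact absurd ((pvB_iff S).mp h) hd
      · exact h
    rw [hA, hB]
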